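-- pv_equiv track=rewrite | github.com/xenia1w/MastersThesis | src/acoustic_feature_extraction/pipeline/generate_perturbations.py | _numeric_sort_key
-- ===== SOURCE A (Python) =====
-- def _numeric_sort_key(name: str) -> tuple[str, int]:
--     digits = ""
--     for ch in reversed(name):
--         if ch.isdigit():
--             digits = ch + digits
--         elif digits:
--             break
--     if digits:
--         return (name.rstrip(digits), int(digits))
--     return (name, -1)
-- ===== SOURCE B (Python) =====
-- def _numeric_sort_key(name: str) -> tuple[str, int]:
--     # Forward single pass: track the digit run in progress and the last completed run.
--     cur = ""
--     last = ""
--     for ch in name: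
--         if ch.isdigit():
--             cur += ch
--         else:
--             if cur:
--                 last = cur
--             cur = ""
--     if cur:
--         last = cur
--     if last:
--         return (name.rstrip(last), int(last))
--     return (name, -1)
-- ===== Notes on version B (the rewrite author's own statement) =====
-- stated objective: alternative
-- what changed: Replaced A's reversed right-to-left scan with early break by a forward single pass that folds (current run, last completed run) accumulators over the string; the rstrip/int tuple step is unchanged.
import Mathlib
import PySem

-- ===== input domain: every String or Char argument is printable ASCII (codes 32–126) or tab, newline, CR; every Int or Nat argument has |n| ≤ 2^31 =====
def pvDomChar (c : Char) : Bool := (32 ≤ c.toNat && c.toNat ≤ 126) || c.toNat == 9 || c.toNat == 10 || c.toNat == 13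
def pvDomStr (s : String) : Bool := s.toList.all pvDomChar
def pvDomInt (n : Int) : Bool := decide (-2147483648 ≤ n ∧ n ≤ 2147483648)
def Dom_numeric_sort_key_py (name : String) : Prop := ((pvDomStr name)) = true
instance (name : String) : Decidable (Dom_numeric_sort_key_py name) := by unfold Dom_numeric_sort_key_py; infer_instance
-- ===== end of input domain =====

-- B is a forward single-pass fold (current run / last completed run) instead of A's reversed scan
-- with break; same return value everywhere (objective: alternative).

-- shared model of the Python builtin name.rstrip(chars): drop trailing chars that occur in `chars` (exact)
def pyRstripChars (s chars : List Char) : List Char :=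
  (s.reverse.dropWhile (fun c => chars.contains c)).reverse

-- shared model of int(digits) on a nonempty all-digit string (the default 0 is unreachable there)
def pyIntDigits (digits : List Char) : Int := (PySem.Int.ofChars? digits).getD 0

-- ===== PORT A =====
-- the `for ch in reversed(name)` loop with its break, carrying the `digits` accumulator
def pvLoopA : List Char → List Char → List Char
  | [], digits => digits
  | ch :: rest, digits =>
      if PySem.Chars.isdigit ch then pvLoopA rest (ch :: digits)
      else if digits ≠ [] then digits
      else pvLoopA rest digits

def numeric_sort_key_py (name : String) : String × Int :=
  let digits := pvLoopA name.toList.reverse []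
  if digits ≠ [] then (String.ofList (pyRstripChars name.toList digits), pyIntDigits digits)
  else (name, -1)

-- ===== PORT B =====
-- the forward `for ch in name` loop of Source B, carrying (cur, last)
def pvLoopB : List Char → List Char → List Char → List Char × List Char
  | [], cur, last => (cur, last)
  | ch :: rest, cur, last =>
      if PySem.Chars.isdigit ch then pvLoopB rest (cur ++ [ch]) last
      else pvLoopB rest [] (if cur ≠ [] then cur else last)

def numeric_sort_key_py_alt (name : String) : String × Int :=
  let p := pvLoopB name.toList [] []
  let last := if p.1 ≠ [] then p.1 else p.2
  if last ≠ [] then (String.ofList (pyRstripChars name.toList last), pyIntDigits last)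
  else (name, -1)

-- ===== PRECONDITION & SPEC =====
def Spec_numeric_sort_key_py (name : String) (out : String × Int) : Prop := out = numeric_sort_key_py_alt name
instance (name : String) (out : String × Int) : Decidable (Spec_numeric_sort_key_py name out) := by unfold Spec_numeric_sort_key_py; infer_instance

-- ===== CLAIM (what is proved, stated in full; the proofs are below) =====
def Claim_equal_numeric_sort_key_py : Prop := ∀ (name : String), Dom_numeric_sort_key_py name → Spec_numeric_sort_key_py name (numeric_sort_key_py name)

-- ===== LEMMAS AND PROOFS =====

-- the rightmost maximal digit run of s (empty if s has no digit)
def pvRun (s : List Char) : List Char :=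
  ((s.reverse.dropWhile (fun c => !PySem.Chars.isdigit c)).takeWhile PySem.Chars.isdigit).reverse

theorem pvLoopA_acc (rs acc : List Char) (h : acc ≠ []) :
    pvLoopA rs acc = (rs.takeWhile PySem.Chars.isdigit).reverse ++ acc := by
  induction rs generalizing acc with
  | nil => simp [pvLoopA]
  | cons c rest ih =>
      by_cases hc : PySem.Chars.isdigit c = true
      · simp [pvLoopA, hc, ih (c :: acc) (by simp)]
      · simp [pvLoopA, hc, h]

theorem pvLoopA_run (s : List Char) : pvLoopA s.reverse [] = pvRun s := by
  unfold pvRun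
  generalize s.reverse = rs
  induction rs with
  | nil => simp [pvLoopA]
  | cons c rest ih =>
      by_cases hc : PySem.Chars.isdigit c = true
      · rw [pvLoopA]
        simp [hc, pvLoopA_acc rest [c] (by simp), List.dropWhile_cons, List.takeWhile_cons]
      · rw [pvLoopA]
        simp only [Bool.not_eq_true] at hc
        simp [hc, ih, List.dropWhile_cons]

theorem pv_all_digits_aux (l : List Char) (h : ∀ c ∈ l, PySem.Chars.isdigit c = true) :
    l.dropWhile (fun c => !PySem.Chars.isdigit c) = l ∧ l.takeWhile PySem.Chars.isdigit = l := by
  induction l with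
  | nil => simp
  | cons a t ih =>
      have ha := h a (by simp)
      have ih' := ih (fun c hc => h c (by simp [hc]))
      simp [List.dropWhile_cons, List.takeWhile_cons, ha, ih'.1, ih'.2]

theorem pvRun_all_digits (w : List Char) (h : ∀ c ∈ w, PySem.Chars.isdigit c = true) :
    pvRun w = w := by
  unfold pvRun
  have := pv_all_digits_aux w.reverse (fun c hc => h c (List.mem_reverse.mp hc))
  rw [this.1, this.2, List.reverse_reverse]

theorem pv_takeWhile_stop (p : Char → Bool) (l : List Char) (c : Char) (t : List Char)
    (hc : p c = false) : ((l ++ c :: t).takeWhile p) = l.takeWhile p := by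
  induction l with
  | nil => simp [List.takeWhile_cons, hc]
  | cons a l ih => by_cases ha : p a = true <;> simp [List.takeWhile_cons, ha, ih]

theorem pv_dropWhile_append (p : Char → Bool) (l₁ l₂ : List Char) :
    (l₁ ++ l₂).dropWhile p =
      if l₁.dropWhile p = [] then l₂.dropWhile p else l₁.dropWhile p ++ l₂ := by
  induction l₁ with
  | nil => simp
  | cons a l ih => by_cases ha : p a = true <;> simp [List.dropWhile_cons, ha, ih]

theorem pv_takeWhile_dropWhile_nil (m : List Char) :
    ((m.dropWhile fun x => !PySem.Chars.isdigit x).takeWhile PySem.Chars.isdigit = []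
      ↔ m.dropWhile (fun x => !PySem.Chars.isdigit x) = []) := by
  induction m with
  | nil => simp
  | cons a t ih =>
      by_cases ha : PySem.Chars.isdigit a = true
      · simp [List.dropWhile_cons, ha, List.takeWhile_cons]
      · simp only [Bool.not_eq_true] at ha
        simp [List.dropWhile_cons, ha, ih]

theorem pvRun_split (v : List Char) (c : Char) (rest : List Char)
    (hv : ∀ x ∈ v, PySem.Chars.isdigit x = true) (hc : PySem.Chars.isdigit c = false) :
    pvRun (v ++ c :: rest) = if pvRun rest ≠ [] then pvRun rest else v := by
  unfold pvRun
  have hrw : (v ++ c :: rest).reverse = rest.reverse ++ (c :: v.reverse) := by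
    simp
  rw [hrw, pv_dropWhile_append]
  by_cases hr : rest.reverse.dropWhile (fun x => !PySem.Chars.isdigit x) = []
  · have hav := pv_all_digits_aux v.reverse (fun x hx => hv x (List.mem_reverse.mp hx))
    simp only [hr, if_true, List.dropWhile_cons, hc, Bool.not_false, if_true]
    rw [hav.1, hav.2, List.reverse_reverse]
    have : (rest.reverse.dropWhile fun x => !PySem.Chars.isdigit x).takeWhile
        PySem.Chars.isdigit = [] := (pv_takeWhile_dropWhile_nil rest.reverse).mpr hr
    simp [this]
  · simp only [hr, if_false]
    rw [pv_takeWhile_stop _ _ _ _ hc]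
    have hne : (rest.reverse.dropWhile fun x => !PySem.Chars.isdigit x).takeWhile
        PySem.Chars.isdigit ≠ [] := fun h => hr ((pv_takeWhile_dropWhile_nil rest.reverse).mp h)
    simp [hne]

theorem pvLoopB_main (s : List Char) (cur last : List Char)
    (hcur : ∀ c ∈ cur, PySem.Chars.isdigit c = true) :
    (if (pvLoopB s cur last).1 ≠ [] then (pvLoopB s cur last).1 else (pvLoopB s cur last).2)
      = if pvRun (cur ++ s) ≠ [] then pvRun (cur ++ s) else last := by
  induction s generalizing cur last with
  | nil =>
      simp only [pvLoopB, List.append_nil, pvRun_all_digits cur hcur]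
  | cons c rest ih =>
      by_cases hc : PySem.Chars.isdigit c = true
      · rw [pvLoopB]
        simp only [hc, if_true]
        rw [ih (cur ++ [c]) last (by
          intro x hx; rcases List.mem_append.mp hx with h | h
          · exact hcur x h
          · simp at h; subst h; exact hc), List.append_assoc]
        rfl
      · rw [pvLoopB]
        simp only [Bool.not_eq_true] at hc
        simp only [hc, Bool.false_eq_true, if_false]
        rw [ih [] _ (by simp)]
        rw [pvRun_split cur c rest hcur (by simpa using hc)]
        simp only [List.nil_append]
        by_cases hr : pvRun rest = []
        · simp [hr]
        · simp [hr]

theorem pv_digits_eq (s : List Char) :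
    pvLoopA s.reverse [] =
      (if (pvLoopB s [] []).1 ≠ [] then (pvLoopB s [] []).1 else (pvLoopB s [] []).2) := by
  rw [pvLoopA_run, pvLoopB_main s [] [] (by simp)]
  simp only [List.nil_append]
  by_cases h : pvRun s = [] <;> simp [h]

-- ===== VERDICT (by name: the statement is the Claim_ definition above) =====
theorem numeric_sort_key_py_spec : Claim_equal_numeric_sort_key_py := by
  intro name _
  unfold Spec_numeric_sort_key_py numeric_sort_key_py numeric_sort_key_py_alt
  rw [pv_digits_eq name.toList]
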